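-- pv_equiv track=rewrite | github.com/NeValetik/lfa_labs | ChomskyNormalForm_5/Grammar3.py | _expandNullableProd
-- ===== SOURCE A (Python) =====
-- def _expandNullableProd(production, nullable):
--     expansions = ['']
--
--     for symbol in production:
--         newExpansions = []
--         if symbol in nullable:
--             for expansion in expansions:
--                 newExpansions.append(expansion + symbol)
--                 newExpansions.append(expansion)
--         else:
--             for expansion in expansions:
--                 newExpansions.append(expansion + symbol)
--         expansions = newExpansions
--
--     return [expansion for expansion in expansions if expansion]
-- ===== SOURCE B (Python) =====
-- def _expandNullableProd(production, nullable):
--     k = sum(1 for symbol in production if symbol in nullable)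
--     result = []
--     for mask in range(1 << k):
--         bit = k
--         chunks = []
--         for symbol in production:
--             if symbol in nullable:
--                 bit -= 1
--                 if not (mask >> bit) & 1:
--                     chunks.append(symbol)
--             else:
--                 chunks.append(symbol)
--         s = ''.join(chunks)
--         if s:
--             result.append(s)
--     return result
-- ===== Notes on version B (the rewrite author's own statement) =====
-- stated objective: alternative
-- what changed: Replaced A's growing doubling-accumulator list (rebuilt once per symbol) by direct bitmask enumeration: count the k nullable occurrences, then for each mask in range(2**k) build the string in one indexed pass over the production, each nullable symbol consuming one bit; no intermediate expansion lists are materialised.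
import Mathlib
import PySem

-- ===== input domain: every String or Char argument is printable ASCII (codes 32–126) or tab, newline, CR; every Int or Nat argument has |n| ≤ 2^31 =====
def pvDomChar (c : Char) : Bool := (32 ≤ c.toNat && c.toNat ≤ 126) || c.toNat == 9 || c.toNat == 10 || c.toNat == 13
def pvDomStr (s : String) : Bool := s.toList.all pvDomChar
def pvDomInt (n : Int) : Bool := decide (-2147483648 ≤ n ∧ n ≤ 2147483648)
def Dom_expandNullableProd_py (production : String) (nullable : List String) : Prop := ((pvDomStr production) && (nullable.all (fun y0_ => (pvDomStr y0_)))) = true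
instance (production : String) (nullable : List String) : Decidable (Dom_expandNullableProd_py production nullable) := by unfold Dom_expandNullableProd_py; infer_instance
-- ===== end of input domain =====

-- B replaces A's doubling accumulator list by direct bitmask enumeration: count the k
-- nullable occurrences, then for each mask in range(2^k) build the string in one indexed
-- pass, consuming one bit per nullable symbol (alternative; same exponential output cost).

-- ===== PORT A =====
-- one iteration of A's outer loop: rebuild newExpansions by appending
def pvStepA (nullable : List String) (expansions : List String) (symbol : Char) : List String :=
  if nullable.contains (String.ofList [symbol]) then
    expansions.foldl (fun acc e => acc ++ [e ++ String.ofList [symbol], e]) []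
  else
    expansions.foldl (fun acc e => acc ++ [e ++ String.ofList [symbol]]) []

def expandNullableProd_py (production : String) (nullable : List String) : List String :=
  (production.toList.foldl (pvStepA nullable) [""]).filter (fun e => e != "")

-- ===== PORT B =====
-- k = sum(1 for symbol in production if symbol in nullable)
def pvCountB (nullable : List String) (chars : List Char) : Nat :=
  (chars.filter (fun c => nullable.contains (String.ofList [c]))).length

-- the inner per-mask pass over the production: nullable symbols consume the next bit
-- (from the high end); bit (mask >> bit) & 1 set means the symbol is dropped
def pvEmitB (nullable : List String) (mask : Nat) : List Char → Nat → List Char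
  | [], _ => []
  | c :: rest, bit =>
    if nullable.contains (String.ofList [c]) then
      (if (mask >>> (bit - 1)) &&& 1 ≠ 1 then [c] else []) ++ pvEmitB nullable mask rest (bit - 1)
    else
      c :: pvEmitB nullable mask rest bit

def expandNullableProd_py_alt (production : String) (nullable : List String) : List String :=
  let chars := production.toList
  let k := pvCountB nullable chars
  (List.range (2 ^ k)).foldl
    (fun result mask =>
      let s := String.ofList (pvEmitB nullable mask chars k)
      if s != "" then result ++ [s] else result) []

-- ===== PRECONDITION & SPEC =====
def Spec_expandNullableProd_py (production : String) (nullable : List String) (out : List String) : Prop := out = expandNullableProd_py_alt production nullable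
instance (production : String) (nullable : List String) (out : List String) : Decidable (Spec_expandNullableProd_py production nullable out) := by unfold Spec_expandNullableProd_py; infer_instance

-- ===== CLAIM (what is proved, stated in full; the proofs are below) =====
def Claim_equal_expandNullableProd_py : Prop := ∀ (production : String) (nullable : List String), Dom_expandNullableProd_py production nullable → Spec_expandNullableProd_py production nullable (expandNullableProd_py production nullable)

-- ===== LEMMAS AND PROOFS =====

-- proof-side spec of both enumerations: keep-first, rightmost symbol fastest
def pvProdC (nullable : List String) : List Char → List (List Char)
  | [] => [[]]
  | c :: rest =>
    let tails := pvProdC nullable rest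
    if nullable.contains (String.ofList [c]) then
      tails.map (fun t => c :: t) ++ tails
    else
      tails.map (fun t => c :: t)

theorem pvStepA_flatMap (nullable : List String) (expansions : List String) (symbol : Char) :
    pvStepA nullable expansions symbol =
      expansions.flatMap (fun e =>
        if nullable.contains (String.ofList [symbol]) then [e ++ String.ofList [symbol], e]
        else [e ++ String.ofList [symbol]]) := by
  unfold pvStepA
  split <;> rename_i h <;>
  · induction expansions with
    | nil => simp
    | cons x xs ih =>
      simp only [List.flatMap_cons, List.foldl_cons] at *
      rw [PySem.List.foldl_append_eq_flatMap] at *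
      simp [ih]

theorem foldl_eq_prodC (nullable : List String) (chars : List Char) (expansions : List String) :
    chars.foldl (pvStepA nullable) expansions =
      expansions.flatMap (fun e => (pvProdC nullable chars).map (fun t => e ++ String.ofList t)) := by
  induction chars generalizing expansions with
  | nil => simp [pvProdC]
  | cons c rest ih =>
    simp only [List.foldl_cons]
    rw [ih, pvStepA_flatMap, List.flatMap_assoc]
    congr 1
    funext e
    by_cases h : String.ofList [c] ∈ nullable <;>
      simp [pvProdC, h, String.append_assoc, List.map_map, Function.comp,
        ← String.ofList_append]

-- pvEmitB only reads mask bits below `bit` (given enough bits for the nullable count)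
theorem pvEmitB_mod (nullable : List String) (chars : List Char) :
    ∀ (bit mask mask' : Nat), pvCountB nullable chars ≤ bit →
      mask % 2 ^ bit = mask' % 2 ^ bit →
      pvEmitB nullable mask chars bit = pvEmitB nullable mask' chars bit := by
  induction chars with
  | nil => intro bit mask mask' _ _; rfl
  | cons c rest ih =>
    intro bit mask mask' hle hmod
    by_cases h : String.ofList [c] ∈ nullable
    · have hcount : pvCountB nullable rest + 1 ≤ bit := by
        simpa [pvCountB, h] using hle
      have hb1 : bit - 1 < bit := by omega
      have hmod' : mask % 2 ^ (bit - 1) = mask' % 2 ^ (bit - 1) := by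
        have hdvd : (2 : Nat) ^ (bit - 1) ∣ 2 ^ bit := pow_dvd_pow 2 (by omega)
        calc mask % 2 ^ (bit - 1) = mask % 2 ^ bit % 2 ^ (bit - 1) :=
              (Nat.mod_mod_of_dvd mask hdvd).symm
          _ = mask' % 2 ^ bit % 2 ^ (bit - 1) := by rw [hmod]
          _ = mask' % 2 ^ (bit - 1) := Nat.mod_mod_of_dvd mask' hdvd
      have hread : (mask >>> (bit - 1)) &&& 1 = (mask' >>> (bit - 1)) &&& 1 := by
        have e1 : ∀ m : Nat, (m >>> (bit - 1)) &&& 1 = m / 2 ^ (bit - 1) % 2 := by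
          intro m; rw [Nat.shiftRight_eq_div_pow, Nat.and_one_is_mod]
        have ht : mask.testBit (bit - 1) = mask'.testBit (bit - 1) := by
          have h1 := Nat.testBit_mod_two_pow (x := mask) (j := bit) (i := bit - 1)
          have h2 := Nat.testBit_mod_two_pow (x := mask') (j := bit) (i := bit - 1)
          rw [hmod, h2] at h1
          simpa [hb1] using h1.symm
        have e3 : ∀ m : Nat, m / 2 ^ (bit - 1) % 2 = if m.testBit (bit - 1) then 1 else 0 := by
          intro m
          rcases Nat.mod_two_eq_zero_or_one (m / 2 ^ (bit - 1)) with hx | hx <;>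
            simp [Nat.testBit_eq_decide_div_mod_eq, hx]
        rw [e1, e1, e3, e3, ht]
      simp only [pvEmitB, h, List.contains_eq_mem, decide_true, if_true, hread,
        ih (bit - 1) mask mask' (by omega) hmod']
    · have hcount : pvCountB nullable rest ≤ bit := by
        simpa [pvCountB, h] using hle
      simp only [pvEmitB, h, List.contains_eq_mem, decide_false, Bool.false_eq_true,
        if_false, ih bit mask mask' hcount hmod]

theorem range_emit (nullable : List String) (chars : List Char) :
    (List.range (2 ^ pvCountB nullable chars)).map
        (fun m => pvEmitB nullable m chars (pvCountB nullable chars)) =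
      pvProdC nullable chars := by
  induction chars with
  | nil => simp [pvCountB, pvProdC, pvEmitB, List.range_one]
  | cons c rest ih =>
    by_cases h : String.ofList [c] ∈ nullable
    · have hk : pvCountB nullable (c :: rest) = pvCountB nullable rest + 1 := by
        simp [pvCountB, h]
      set k := pvCountB nullable rest with hkdef
      have hsplit : (2 : Nat) ^ (k + 1) = 2 ^ k + 2 ^ k := by ring
      rw [hk, hsplit, List.range_add, List.map_append, List.map_map]
      have hlow : ∀ m ∈ List.range (2 ^ k),
          pvEmitB nullable m (c :: rest) (k + 1) = c :: pvEmitB nullable m rest k := by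
        intro m hm
        rw [List.mem_range] at hm
        have hz : m >>> k = 0 := by
          rw [Nat.shiftRight_eq_div_pow]; exact Nat.div_eq_of_lt hm
        simp [pvEmitB, h, hz]
      have hhigh : ∀ m ∈ List.range (2 ^ k),
          pvEmitB nullable (2 ^ k + m) (c :: rest) (k + 1) = pvEmitB nullable m rest k := by
        intro m hm
        rw [List.mem_range] at hm
        have ho : (2 ^ k + m) >>> k = 1 := by
          rw [Nat.shiftRight_eq_div_pow, Nat.add_comm, Nat.add_div_right m (Nat.two_pow_pos k),
            Nat.div_eq_of_lt hm]
        have hrec : pvEmitB nullable (2 ^ k + m) rest k = pvEmitB nullable m rest k := by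
          apply pvEmitB_mod nullable rest k _ _ le_rfl
          rw [Nat.add_mod_left]
        simp [pvEmitB, h, ho, hrec]
      calc (List.range (2 ^ k)).map (fun m => pvEmitB nullable m (c :: rest) (k + 1)) ++
            (List.range (2 ^ k)).map (fun m => pvEmitB nullable (2 ^ k + m) (c :: rest) (k + 1))
          = (List.range (2 ^ k)).map (fun m => c :: pvEmitB nullable m rest k) ++
            (List.range (2 ^ k)).map (fun m => pvEmitB nullable m rest k) := by
            rw [List.map_congr_left hlow, List.map_congr_left hhigh]
        _ = pvProdC nullable (c :: rest) := by
            simp [pvProdC, h, ← ih, List.map_map, Function.comp]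
    · have hk : pvCountB nullable (c :: rest) = pvCountB nullable rest := by
        simp [pvCountB, h]
      rw [hk]
      have : ∀ m ∈ List.range (2 ^ pvCountB nullable rest),
          pvEmitB nullable m (c :: rest) (pvCountB nullable rest)
            = c :: pvEmitB nullable m rest (pvCountB nullable rest) := by
        intro m _; simp [pvEmitB, h]
      rw [List.map_congr_left this]
      simp [pvProdC, h, ← ih, List.map_map, Function.comp]

theorem alt_eq_filter (nullable : List String) (chars : List Char) :
    (List.range (2 ^ pvCountB nullable chars)).foldl
        (fun result mask =>
          let s := String.ofList (pvEmitB nullable mask chars (pvCountB nullable chars))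
          if s != "" then result ++ [s] else result) [] =
      ((pvProdC nullable chars).map String.ofList).filter (fun e => e != "") := by
  rw [PySem.List.foldl_append_if
        (fun m => String.ofList (pvEmitB nullable m chars (pvCountB nullable chars)) != "")
        (fun m => String.ofList (pvEmitB nullable m chars (pvCountB nullable chars)))]
  rw [← range_emit, List.map_map, List.filter_map]
  simp only [Function.comp_def, List.nil_append]

-- ===== VERDICT (by name: the statement is the Claim_ definition above) =====
theorem expandNullableProd_py_spec : Claim_equal_expandNullableProd_py := by
  intro production nullable _
  unfold Spec_expandNullableProd_py expandNullableProd_py expandNullableProd_py_alt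
  rw [foldl_eq_prodC]
  rw [alt_eq_filter]
  simp
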